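-- pv_equiv track=rewrite | github.com/rutgermeuzelaar/Advent_of_Code_2023 | day_8/navigate.py | get_steps_recursive
-- ===== SOURCE A (Python) =====
-- def get_steps_recursive(steps: int, nodes: list, instructions: str, current_node: str, instructions_count: int):
-- 	if (current_node == "ZZZ"):
-- 		return (steps)
-- 	instruction_len = len(instructions)
-- 	if (steps % instruction_len == 0):
-- 		instructions_count += 1
-- 	current_instruction = instructions[steps - (instructions_count * instruction_len)]
-- 	if (current_instruction == 'L'):
-- 		current_node = nodes.get(current_node)[0]
-- 	else:
-- 		current_node = nodes.get(current_node)[1]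
-- 	return (get_steps_recursive(steps + 1, nodes, instructions, current_node, instructions_count))
-- ===== SOURCE B (Python) =====
-- def get_steps_recursive(steps: int, nodes: list, instructions: str, current_node: str, instructions_count: int):
--     if current_node == "ZZZ":
--         return steps
--     tail = instructions[steps % len(instructions):]
--     while True:
--         for ch in tail:
--             if current_node == "ZZZ":
--                 return steps
--             pair = nodes.get(current_node)
--             current_node = pair[0] if ch == 'L' else pair[1]
--             steps += 1
--         tail = instructions
-- ===== Notes on version B (the rewrite author's own statement) =====
-- stated objective: alternative
-- what changed: Replaces the step-per-call recursion with its instructions_count/index bookkeeping by a chunked iteration: slice the instruction string once at steps % len, then walk it character by character in an inner for-loop, refilling with the whole string each outer pass, so no per-step index arithmetic is done.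
import Mathlib
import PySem

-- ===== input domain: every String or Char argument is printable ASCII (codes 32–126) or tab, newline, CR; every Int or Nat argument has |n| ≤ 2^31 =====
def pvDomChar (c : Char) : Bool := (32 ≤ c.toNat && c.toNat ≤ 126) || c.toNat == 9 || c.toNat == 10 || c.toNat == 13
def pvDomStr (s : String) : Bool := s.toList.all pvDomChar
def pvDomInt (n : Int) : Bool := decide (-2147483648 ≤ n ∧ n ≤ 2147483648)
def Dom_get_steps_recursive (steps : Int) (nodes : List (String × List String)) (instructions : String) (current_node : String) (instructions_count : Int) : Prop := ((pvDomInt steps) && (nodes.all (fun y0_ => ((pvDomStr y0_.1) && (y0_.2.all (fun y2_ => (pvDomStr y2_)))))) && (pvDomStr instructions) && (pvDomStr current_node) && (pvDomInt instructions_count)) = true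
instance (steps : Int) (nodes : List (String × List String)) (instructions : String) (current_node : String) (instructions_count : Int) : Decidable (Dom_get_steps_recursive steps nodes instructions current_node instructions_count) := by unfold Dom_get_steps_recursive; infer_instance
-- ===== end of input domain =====

-- B replaces A's step-at-a-time recursion with its index/instructions_count arithmetic by a
-- chunked iteration: slice the instruction string once at steps % len, then walk it character
-- by character, refilling with the whole string each pass; objective: simpler (same step count).

-- Python dict.get on the association list (first match, none = key missing → both Pythons
-- subscript None and raise there)
def pvDictGet (nodes : List (String × List String)) (k : String) : Option (List String) :=
  (nodes.find? (fun p => p.1 == k)).map (·.2)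

-- ===== PORT A =====
-- A recurses once per step; the Lean port is fuel-bounded. pvFuelA exceeds the number of
-- distinct (node, instruction-position) states of the deterministic walk, so a walk that does
-- not finish within it repeats a state and never finishes (Python A then recurses forever,
-- i.e. raises RecursionError); the fuel therefore cuts off no input on which A returns.
def pvFuelA (nodes : List (String × List String)) (instructions : String) : Nat :=
  (2 * nodes.length + 2) * instructions.toList.length + 2

def get_steps_recursive_go (nodes : List (String × List String)) (instructions : String) :
    Nat → Int → String → Int → Int
  | fuel, steps, current_node, instructions_count =>
    if current_node = "ZZZ" then steps
    else
      match fuel with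
      | 0 => 0
      | fuel + 1 =>
        let instruction_len : Int := PySem.Str.len instructions
        let instructions_count : Int :=
          if PySem.Int.mod steps instruction_len = 0 then instructions_count + 1
          else instructions_count
        match PySem.Str.pyGet? instructions (steps - instructions_count * instruction_len) with
        | none => 0  -- IndexError, outside Pre_
        | some current_instruction =>
          match pvDictGet nodes current_node with
          | none => 0  -- nodes.get(...) is None, outside Pre_
          | some pair =>
            match (if current_instruction = 'L'
                   then PySem.List.pyGet? pair 0 else PySem.List.pyGet? pair 1) with
            | none => 0  -- IndexError, outside Pre_
            | some current_node =>
              get_steps_recursive_go nodes instructions fuel (steps + 1) current_node instructions_count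

def get_steps_recursive (steps : Int) (nodes : List (String × List String)) (instructions : String) (current_node : String) (instructions_count : Int) : Int :=
  get_steps_recursive_go nodes instructions (pvFuelA nodes instructions) steps current_node instructions_count

-- ===== PORT B =====
-- inner 'for ch in tail' loop: walks the chunk; Sum.inl = the 'return steps' inside the for,
-- Sum.inr = the chunk is exhausted, none = Python raised (outside Pre_)
def get_steps_recursive_alt_chunk (nodes : List (String × List String)) :
    List Char → Int → String → Option (Int ⊕ (Int × String))
  | [], steps, cur => some (Sum.inr (steps, cur))
  | ch :: tail, steps, cur =>
    if cur = "ZZZ" then some (Sum.inl steps)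
    else
      match pvDictGet nodes cur with
      | none => none
      | some pair =>
        match (if ch = 'L' then PySem.List.pyGet? pair 0 else PySem.List.pyGet? pair 1) with
        | none => none
        | some nxt => get_steps_recursive_alt_chunk nodes tail (steps + 1) nxt

-- outer 'while True' loop, fuel-bounded: enough passes for any walk pvFuelA steps long
def pvFuelB (nodes : List (String × List String)) : Nat := 2 * nodes.length + 6

def get_steps_recursive_alt_loop (nodes : List (String × List String)) (instructions : String) :
    Nat → List Char → Int → String → Int
  | 0, _, _, _ => 0
  | fuel + 1, tail, steps, cur =>
    match get_steps_recursive_alt_chunk nodes tail steps cur with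
    | some (Sum.inl r) => r
    | some (Sum.inr (steps', cur')) =>
      get_steps_recursive_alt_loop nodes instructions fuel instructions.toList steps' cur'
    | none => 0

def get_steps_recursive_alt (steps : Int) (nodes : List (String × List String)) (instructions : String) (current_node : String) (instructions_count : Int) : Int :=
  if current_node = "ZZZ" then steps
  else
    let n : Int := PySem.Str.len instructions
    if n = 0 then 0  -- Python B raises ZeroDivisionError on steps % 0 here, outside Pre_
    else
      get_steps_recursive_alt_loop nodes instructions (pvFuelB nodes)
        (PySem.List.slice instructions.toList (some (PySem.Int.mod steps n)) none)
        steps current_node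

-- ===== PRECONDITION & SPEC =====
-- pvDist follows the deterministic walk (pos = cyclic instruction cursor) and returns the
-- number of steps to "ZZZ": none = a lookup fails or "ZZZ" is not reached within the fuel.
-- Whether A terminates without raising IS a property of this walk and has no closed form
-- over the bare inputs; pvDist is the minimal statement of it, not a copy of either port.
def pvDist (nodes : List (String × List String)) (L : List Char) : Nat → Nat → String → Option Nat
  | fuel, pos, cur =>
    if cur = "ZZZ" then some 0
    else
      match fuel with
      | 0 => none
      | fuel + 1 =>
        (pvDictGet nodes cur).bind fun pair =>
        ((if L.getD pos ' ' = 'L'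
          then PySem.List.pyGet? pair 0 else PySem.List.pyGet? pair 1).bind fun nxt =>
        (pvDist nodes L fuel ((pos + 1) % L.length) nxt).map (· + 1))

-- Pre_ excludes exactly the inputs on which Python A raises: an empty instruction string with a
-- non-"ZZZ" start (ZeroDivisionError), a steps/instructions_count pair whose first index
-- steps - count*len falls outside the string (IndexError; in range iff (steps-1)//len is
-- instructions_count or instructions_count - 1), a walk hitting a missing node or a too-short
-- successor list (TypeError/IndexError), and a walk that never reaches "ZZZ" (A recurses forever;
-- pvFuelA exceeds the number of distinct walk states, so failing within it means never).
def Pre_get_steps_recursive (steps : Int) (nodes : List (String × List String)) (instructions : String) (current_node : String) (instructions_count : Int) : Prop :=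
  current_node = "ZZZ" ∨
  (instructions.toList ≠ [] ∧
   (PySem.Int.floordiv (steps - 1) (PySem.Str.len instructions) = instructions_count ∨
    PySem.Int.floordiv (steps - 1) (PySem.Str.len instructions) = instructions_count - 1) ∧
   (pvDist nodes instructions.toList (pvFuelA nodes instructions)
      (PySem.Int.mod steps (PySem.Str.len instructions)).toNat current_node).isSome)
instance (steps : Int) (nodes : List (String × List String)) (instructions : String) (current_node : String) (instructions_count : Int) : Decidable (Pre_get_steps_recursive steps nodes instructions current_node instructions_count) := by unfold Pre_get_steps_recursive; infer_instance

def pvWitness_get_steps_recursive : Int × (List (String × List String)) × String × String × Int :=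
  (0, [("AAA", ["BBB", "AAA"]), ("BBB", ["ZZZ", "AAA"])], "LL", "AAA", 0)

def Spec_get_steps_recursive (steps : Int) (nodes : List (String × List String)) (instructions : String) (current_node : String) (instructions_count : Int) (out : Int) : Prop := out = get_steps_recursive_alt steps nodes instructions current_node instructions_count
instance (steps : Int) (nodes : List (String × List String)) (instructions : String) (current_node : String) (instructions_count : Int) (out : Int) : Decidable (Spec_get_steps_recursive steps nodes instructions current_node instructions_count out) := by unfold Spec_get_steps_recursive; infer_instance

-- ===== CLAIM (what is proved, stated in full; the proofs are below) =====
def Claim_equal_get_steps_recursive : Prop := ∀ (steps : Int) (nodes : List (String × List String)) (instructions : String) (current_node : String) (instructions_count : Int), Dom_get_steps_recursive steps nodes instructions current_node instructions_count → Pre_get_steps_recursive steps nodes instructions current_node instructions_count → Spec_get_steps_recursive steps nodes instructions current_node instructions_count (get_steps_recursive steps nodes instructions current_node instructions_count)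

-- ===== LEMMAS AND PROOFS =====

-- pvDistE pos cur k: the walk from cur with cursor pos reaches "ZZZ" in exactly k steps
def pvDistE (nodes : List (String × List String)) (L : List Char) (pos : Nat) (cur : String) (k : Nat) : Prop :=
  ∃ f, pvDist nodes L f pos cur = some k

-- a reference single-step walker indexing the string with steps % len; A's port reduces to it
def pvRef (nodes : List (String × List String)) (instructions : String) (n : Int) :
    Nat → Int → String → Int
  | fuel, steps, cur =>
    if cur = "ZZZ" then steps
    else
      match fuel with
      | 0 => 0
      | fuel + 1 =>
        match PySem.Str.pyGet? instructions (PySem.Int.mod steps n) with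
        | none => 0
        | some instruction =>
          match pvDictGet nodes cur with
          | none => 0
          | some pair =>
            match (if instruction = 'L'
                   then PySem.List.pyGet? pair 0 else PySem.List.pyGet? pair 1) with
            | none => 0
            | some cur' => pvRef nodes instructions n fuel (steps + 1) cur'

-- (s-1)/L drops by one exactly at multiples of L
lemma pv_ediv_pred (s L : Int) (hL : 0 < L) :
    (s - 1) / L = s / L - (if s % L = 0 then 1 else 0) := by
  have h1 := Int.mul_ediv_add_emod s L
  have h2 : 0 ≤ s % L := Int.emod_nonneg s (by omega)
  have h3 : s % L < L := Int.emod_lt_of_pos s hL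
  split_ifs with h
  · have hs : s - 1 = (L - 1) + (s / L - 1) * L := by linarith
    rw [hs, Int.add_mul_ediv_right _ _ (by omega : L ≠ 0),
        Int.ediv_eq_zero_of_lt (by omega) (by omega)]
    ring
  · have hs : s - 1 = (s % L - 1) + (s / L) * L := by linarith
    rw [hs, Int.add_mul_ediv_right _ _ (by omega : L ≠ 0),
        Int.ediv_eq_zero_of_lt (by omega) (by omega)]
    ring

lemma pv_floordiv_pred (s L : Int) (hL : 0 < L) :
    PySem.Int.floordiv (s - 1) L
      = PySem.Int.floordiv s L - (if PySem.Int.mod s L = 0 then 1 else 0) := by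
  rw [PySem.Int.floordiv_eq_ediv_of_pos hL, PySem.Int.floordiv_eq_ediv_of_pos hL,
      PySem.Int.mod_eq_emod_of_pos hL]
  exact pv_ediv_pred s L hL

-- a negative in-range index reads the same character as its nonnegative shift
lemma pv_pyGet?_sub_len (l : List Char) (i : Int) (h0 : 0 ≤ i) (h1 : i < (l.length : Int)) :
    PySem.List.pyGet? l (i - (l.length : Int)) = PySem.List.pyGet? l i := by
  simp only [PySem.List.pyGet?, PySem.List.pyIdx?]
  rw [if_neg (by omega), if_pos (by omega), if_pos h0, if_pos h1]
  congr 2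
  omega

-- a nonnegative in-range index reads getD at its toNat
lemma pv_pyGet?_nonneg (l : List Char) (i : Int) (h0 : 0 ≤ i) (h1 : i < (l.length : Int)) :
    PySem.List.pyGet? l i = some (l.getD i.toNat ' ') := by
  simp only [PySem.List.pyGet?, PySem.List.pyIdx?]
  rw [if_pos h0, if_pos h1]
  simp [List.getD_eq_getElem?_getD, List.getElem?_eq_getElem (show i.toNat < l.length by omega)]

-- A's index expression equals the cyclic index, modulo a possible shift by -len
lemma pv_index_eq (s c L : Int) (hL : 0 < L) :
    s - (if PySem.Int.mod s L = 0 then c + 1 else c) * L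
      = PySem.Int.mod s L + (PySem.Int.floordiv (s - 1) L - c) * L := by
  have hq := PySem.Int.floordiv_mul_add_mod s L
  have hstep := pv_floordiv_pred s L hL
  split_ifs at hstep ⊢ with h <;> linear_combination -hq - L * hstep

-- A's recursion equals the reference walker under the index invariant
lemma pv_go_eq (nodes : List (String × List String)) (instructions : String) (fuel : Nat) :
    ∀ (steps instructions_count : Int) (cur : String),
    instructions.toList ≠ [] →
    (PySem.Int.floordiv (steps - 1) (PySem.Str.len instructions) = instructions_count ∨
     PySem.Int.floordiv (steps - 1) (PySem.Str.len instructions) = instructions_count - 1) →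
    get_steps_recursive_go nodes instructions fuel steps cur instructions_count
      = pvRef nodes instructions (PySem.Str.len instructions) fuel steps cur := by
  induction fuel with
  | zero =>
    intro s c cur hne hK
    by_cases hz : cur = "ZZZ" <;>
      simp [get_steps_recursive_go, pvRef, hz]
  | succ fuel ih =>
    intro s c cur hne hK
    by_cases hz : cur = "ZZZ"
    · simp [get_steps_recursive_go, pvRef, hz]
    · have hL : 0 < PySem.Str.len instructions := by
        simp only [PySem.Str.len]
        have := List.length_pos_iff.mpr hne
        omega
      have hLc : PySem.Str.len instructions = ((instructions.toList.length : Nat) : Int) := by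
        simp [PySem.Str.len]
      have hm0 : 0 ≤ PySem.Int.mod s (PySem.Str.len instructions) := PySem.Int.mod_nonneg s hL
      have hm1 : PySem.Int.mod s (PySem.Str.len instructions) < PySem.Str.len instructions :=
        PySem.Int.mod_lt s hL
      have hidx := pv_index_eq s c (PySem.Str.len instructions) hL
      have hchar : PySem.Str.pyGet? instructions
            (s - (if PySem.Int.mod s (PySem.Str.len instructions) = 0 then c + 1 else c) *
              PySem.Str.len instructions)
          = PySem.Str.pyGet? instructions (PySem.Int.mod s (PySem.Str.len instructions)) := by
        rw [hidx]
        rcases hK with hK | hK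
        · rw [hK]; ring_nf
        · rw [hK]
          have h2 : PySem.Int.mod s (PySem.Str.len instructions) +
                (c - 1 - c) * PySem.Str.len instructions
              = PySem.Int.mod s (PySem.Str.len instructions) - PySem.Str.len instructions := by
            ring
          rw [h2]
          simp only [PySem.Str.pyGet?, PySem.Chars.pyGet?]
          rw [hLc] at hm0 hm1 ⊢
          exact pv_pyGet?_sub_len instructions.toList _ hm0 hm1
      have hstep := pv_floordiv_pred s (PySem.Str.len instructions) hL
      have hK' : PySem.Int.floordiv (s + 1 - 1) (PySem.Str.len instructions)
            = (if PySem.Int.mod s (PySem.Str.len instructions) = 0 then c + 1 else c) ∨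
          PySem.Int.floordiv (s + 1 - 1) (PySem.Str.len instructions)
            = (if PySem.Int.mod s (PySem.Str.len instructions) = 0 then c + 1 else c) - 1 := by
        have hs1 : s + 1 - 1 = s := by ring
        rw [hs1]
        split_ifs at hstep ⊢ with h <;> omega
      simp only [get_steps_recursive_go, pvRef, if_neg hz]
      rw [hchar]
      cases hc : PySem.Str.pyGet? instructions (PySem.Int.mod s (PySem.Str.len instructions)) with
      | none => rfl
      | some ch =>
        cases hp : pvDictGet nodes cur with
        | none => rfl
        | some pair =>
          cases hn : (if ch = 'L' then PySem.List.pyGet? pair 0 else PySem.List.pyGet? pair 1) with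
          | none => simp only [hn]
          | some nxt =>
            simp only [hn]
            exact ih (s + 1) _ nxt hne hK'

-- pvDist inversion and bounds
lemma pv_dist_zzz (nodes : List (String × List String)) (L : List Char) (f pos : Nat) :
    pvDist nodes L f pos "ZZZ" = some 0 := by
  cases f <;> simp [pvDist]

lemma pv_distE_zzz (nodes : List (String × List String)) (L : List Char) (pos : Nat) (k : Nat)
    (h : pvDistE nodes L pos "ZZZ" k) : k = 0 := by
  obtain ⟨f, hf⟩ := h
  rw [pv_dist_zzz] at hf
  exact (Option.some_inj.mp hf).symm

lemma pv_distE_zero (nodes : List (String × List String)) (L : List Char) (pos : Nat)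
    (cur : String) (h : pvDistE nodes L pos cur 0) : cur = "ZZZ" := by
  obtain ⟨f, hf⟩ := h
  by_contra hz
  cases f with
  | zero => simp [pvDist, hz] at hf
  | succ f =>
    simp only [pvDist, if_neg hz] at hf
    cases hp : pvDictGet nodes cur with
    | none => rw [hp] at hf; simp at hf
    | some pair =>
      rw [hp] at hf
      simp only [Option.bind_some] at hf
      cases hn : (if L.getD pos ' ' = 'L' then PySem.List.pyGet? pair 0 else PySem.List.pyGet? pair 1) with
      | none => rw [hn] at hf; simp at hf
      | some nxt =>
        rw [hn] at hf
        simp only [Option.bind_some] at hf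
        cases hd : pvDist nodes L f ((pos + 1) % L.length) nxt with
        | none => rw [hd] at hf; simp at hf
        | some m => rw [hd] at hf; simp at hf

lemma pv_distE_step (nodes : List (String × List String)) (L : List Char) (pos : Nat)
    (cur : String) (k : Nat) (hz : cur ≠ "ZZZ") (h : pvDistE nodes L pos cur (k + 1)) :
    ∃ pair nxt, pvDictGet nodes cur = some pair ∧
      (if L.getD pos ' ' = 'L' then PySem.List.pyGet? pair 0 else PySem.List.pyGet? pair 1) = some nxt ∧
      pvDistE nodes L ((pos + 1) % L.length) nxt k := by
  obtain ⟨f, hf⟩ := h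
  cases f with
  | zero => simp [pvDist, hz] at hf
  | succ f =>
    simp only [pvDist, if_neg hz] at hf
    cases hp : pvDictGet nodes cur with
    | none => rw [hp] at hf; simp at hf
    | some pair =>
      rw [hp] at hf
      simp only [Option.bind_some] at hf
      cases hn : (if L.getD pos ' ' = 'L' then PySem.List.pyGet? pair 0 else PySem.List.pyGet? pair 1) with
      | none => rw [hn] at hf; simp at hf
      | some nxt =>
        rw [hn] at hf
        simp only [Option.bind_some] at hf
        cases hd : pvDist nodes L f ((pos + 1) % L.length) nxt with
        | none => rw [hd] at hf; simp at hf
        | some m =>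
          rw [hd] at hf
          simp only [Option.map_some, Option.some_inj] at hf
          exact ⟨pair, nxt, rfl, hn, f, by rw [hd, show m = k from by omega]⟩

lemma pv_dist_le (nodes : List (String × List String)) (L : List Char) :
    ∀ (f pos : Nat) (cur : String) (k : Nat), pvDist nodes L f pos cur = some k → k ≤ f := by
  intro f
  induction f with
  | zero =>
    intro pos cur k hf
    by_cases hz : cur = "ZZZ"
    · simp [pvDist, hz] at hf
      omega
    · simp [pvDist, hz] at hf
  | succ f ih =>
    intro pos cur k hf
    by_cases hz : cur = "ZZZ"
    · simp [pvDist, hz] at hf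
      omega
    · simp only [pvDist, if_neg hz] at hf
      cases hp : pvDictGet nodes cur with
      | none => rw [hp] at hf; simp at hf
      | some pair =>
        rw [hp] at hf
        simp only [Option.bind_some] at hf
        cases hn : (if L.getD pos ' ' = 'L' then PySem.List.pyGet? pair 0 else PySem.List.pyGet? pair 1) with
        | none => rw [hn] at hf; simp at hf
        | some nxt =>
          rw [hn] at hf
          simp only [Option.bind_some] at hf
          cases hd : pvDist nodes L f ((pos + 1) % L.length) nxt with
          | none => rw [hd] at hf; simp at hf
          | some m =>
            rw [hd] at hf
            simp only [Option.map_some, Option.some_inj] at hf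
            have := ih _ _ _ hd
            omega

-- the cyclic cursor advances by one when steps advances by one
lemma pv_mod_succ (s : Int) (n : Nat) (h : 0 < n) :
    (PySem.Int.mod (s + 1) (n : Int)).toNat = ((PySem.Int.mod s (n : Int)).toNat + 1) % n := by
  have hn : (0 : Int) < (n : Int) := by exact_mod_cast h
  rw [PySem.Int.mod_eq_emod_of_pos hn, PySem.Int.mod_eq_emod_of_pos hn]
  have h0 : 0 ≤ s % (n : Int) := Int.emod_nonneg s (by omega)
  have h1 : s % (n : Int) < n := Int.emod_lt_of_pos s hn
  have hq := Int.mul_ediv_add_emod s (n : Int)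
  have hs : s + 1 = (s % (n : Int) + 1) + (n : Int) * (s / (n : Int)) := by linarith
  rw [hs, Int.add_mul_emod_self_left]
  by_cases hc : s % (n : Int) + 1 < (n : Int)
  · rw [Int.emod_eq_of_lt (by omega) hc]
    have : (s % (n : Int)).toNat + 1 < n := by omega
    rw [Nat.mod_eq_of_lt this]
    omega
  · have he : s % (n : Int) + 1 = (n : Int) := by omega
    rw [he, Int.emod_self]
    have : (s % (n : Int)).toNat + 1 = n := by omega
    rw [this, Nat.mod_self]
    rfl

-- reference walker correctness against pvDist
lemma pv_ref_eq (nodes : List (String × List String)) (instructions : String)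
    (hne : instructions.toList ≠ []) :
    ∀ (k fuel : Nat) (s : Int) (cur : String), k ≤ fuel →
    pvDistE nodes instructions.toList
      (PySem.Int.mod s (PySem.Str.len instructions)).toNat cur k →
    pvRef nodes instructions (PySem.Str.len instructions) fuel s cur = s + k := by
  intro k
  induction k with
  | zero =>
    intro fuel s cur _ hd
    have hz := pv_distE_zero _ _ _ _ hd
    subst hz
    cases fuel <;> simp [pvRef]
  | succ k ih =>
    intro fuel s cur hk hd
    have hL : 0 < PySem.Str.len instructions := by
      simp only [PySem.Str.len]
      have := List.length_pos_iff.mpr hne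
      omega
    have hz : cur ≠ "ZZZ" := by
      intro hz; subst hz
      have := pv_distE_zzz _ _ _ _ hd
      omega
    obtain ⟨fuel, rfl⟩ : ∃ f, fuel = f + 1 := ⟨fuel - 1, by omega⟩
    obtain ⟨pair, nxt, hp, hn, hd'⟩ := pv_distE_step _ _ _ _ _ hz hd
    have hm0 : 0 ≤ PySem.Int.mod s (PySem.Str.len instructions) := PySem.Int.mod_nonneg s hL
    have hm1 : PySem.Int.mod s (PySem.Str.len instructions) < PySem.Str.len instructions :=
      PySem.Int.mod_lt s hL
    have hLc : PySem.Str.len instructions = ((instructions.toList.length : Nat) : Int) := by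
      simp [PySem.Str.len]
    have hchar : PySem.Str.pyGet? instructions (PySem.Int.mod s (PySem.Str.len instructions))
        = some (instructions.toList.getD
            (PySem.Int.mod s (PySem.Str.len instructions)).toNat ' ') := by
      simp only [PySem.Str.pyGet?, PySem.Chars.pyGet?]
      rw [hLc] at hm0 hm1 ⊢
      exact pv_pyGet?_nonneg instructions.toList _ hm0 hm1
    have hmods : (PySem.Int.mod (s + 1) (PySem.Str.len instructions)).toNat
        = ((PySem.Int.mod s (PySem.Str.len instructions)).toNat + 1) % instructions.toList.length := by
      rw [hLc]
      exact pv_mod_succ s instructions.toList.length (List.length_pos_iff.mpr hne)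
    simp only [pvRef, if_neg hz]
    rw [hchar]
    dsimp only
    rw [hp]
    dsimp only
    rw [hn]
    dsimp only
    have := ih fuel (s + 1) nxt (by omega) (by rw [hmods]; exact hd')
    rw [this]
    push_cast
    ring

-- the inner for-loop over a chunk whose characters agree with the cyclic cursor
lemma pv_chunk_eq (nodes : List (String × List String)) (L : List Char) :
    ∀ (cs : List Char) (pos : Nat) (s : Int) (cur : String) (k : Nat),
    pvDistE nodes L (pos % L.length) cur k →
    (∀ j, j < cs.length → cs.getD j ' ' = L.getD ((pos + j) % L.length) ' ') →
    (k < cs.length → get_steps_recursive_alt_chunk nodes cs s cur = some (Sum.inl (s + k))) ∧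
    (cs.length ≤ k → ∃ cur',
      get_steps_recursive_alt_chunk nodes cs s cur = some (Sum.inr (s + (cs.length : Int), cur')) ∧
      pvDistE nodes L ((pos + cs.length) % L.length) cur' (k - cs.length)) := by
  intro cs
  induction cs with
  | nil =>
    intro pos s cur k hd _
    refine ⟨by intro h; simp at h, ?_⟩
    intro _
    exact ⟨cur, by simp [get_steps_recursive_alt_chunk], by simpa using hd⟩
  | cons ch cs ih =>
    intro pos s cur k hd hagree
    by_cases hz : cur = "ZZZ"
    · subst hz
      have hk0 := pv_distE_zzz _ _ _ _ hd
      subst hk0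
      constructor
      · intro _
        simp [get_steps_recursive_alt_chunk]
      · intro h
        simp at h
    · obtain ⟨k', rfl⟩ : ∃ k', k = k' + 1 := by
        cases k with
        | zero => exact absurd (pv_distE_zero _ _ _ _ hd) hz
        | succ k' => exact ⟨k', rfl⟩
      obtain ⟨pair, nxt, hp, hn, hd'⟩ := pv_distE_step _ _ _ _ _ hz hd
      have hch : ch = L.getD (pos % L.length) ' ' := by
        have := hagree 0 (by simp)
        simpa using this
      have hd'' : pvDistE nodes L ((pos + 1) % L.length) nxt k' := by
        have : (pos % L.length + 1) % L.length = (pos + 1) % L.length := by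
          conv_rhs => rw [← Nat.mod_add_mod]
        rwa [this] at hd'
      have hagree' : ∀ j, j < cs.length → cs.getD j ' ' = L.getD ((pos + 1 + j) % L.length) ' ' := by
        intro j hj
        have := hagree (j + 1) (by simpa using Nat.succ_lt_succ hj)
        simpa [Nat.add_assoc, Nat.add_comm 1 j, Nat.add_left_comm] using this
      have IH := ih (pos + 1) (s + 1) nxt k' hd'' hagree'
      constructor
      · intro hlt
        have hlt' : k' < cs.length := by simpa using Nat.lt_of_succ_lt_succ hlt
        have hrec := IH.1 hlt'
        rw [← hch] at hn
        simp only [get_steps_recursive_alt_chunk, if_neg hz]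
        rw [hp]
        dsimp only
        rw [hn]
        dsimp only
        rw [hrec]
        simp only [Option.some_inj, Sum.inl.injEq]
        push_cast
        ring
      · intro hle
        have hle' : cs.length ≤ k' := by simpa using Nat.le_of_succ_le_succ hle
        obtain ⟨cur', hc, hdc⟩ := IH.2 hle'
        refine ⟨cur', ?_, ?_⟩
        · rw [← hch] at hn
          simp only [get_steps_recursive_alt_chunk, if_neg hz]
          rw [hp]
          dsimp only
          rw [hn]
          dsimp only
          rw [hc]
          simp only [Option.some_inj, Sum.inr.injEq, Prod.mk.injEq]
          refine ⟨?_, trivial⟩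
          simp only [List.length_cons]
          push_cast
          ring
        · have : pos + 1 + cs.length = pos + (ch :: cs).length := by simp only [List.length_cons]; omega
          rw [this] at hdc
          simpa using hdc
  
-- the outer while-loop
lemma pv_loop_eq (nodes : List (String × List String)) (instructions : String)
    (hne : instructions.toList ≠ []) :
    ∀ (q pos : Nat) (s : Int) (cur : String) (k : Nat), 0 < q →
    pvDistE nodes instructions.toList pos cur k →
    pos < instructions.toList.length →
    k < (instructions.toList.length - pos) + (q - 1) * instructions.toList.length →
    get_steps_recursive_alt_loop nodes instructions q (instructions.toList.drop pos) s cur = s + k := by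
  intro q
  induction q with
  | zero => intro pos s cur k h; omega
  | succ q ih =>
    intro pos s cur k _ hd hpos hk
    set L := instructions.toList with hL
    have hlen : (L.drop pos).length = L.length - pos := by simp
    have hagree : ∀ j, j < (L.drop pos).length →
        (L.drop pos).getD j ' ' = L.getD ((pos + j) % L.length) ' ' := by
      intro j hj
      rw [hlen] at hj
      have hpj : pos + j < L.length := by omega
      rw [Nat.mod_eq_of_lt hpj]
      rw [List.getD_eq_getElem?_getD, List.getD_eq_getElem?_getD,
          List.getElem?_drop]
    have hd' : pvDistE nodes L (pos % L.length) cur k := by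
      rwa [Nat.mod_eq_of_lt hpos]
    have hchunk := pv_chunk_eq nodes L (L.drop pos) pos s cur k hd' hagree
    by_cases hlt : k < (L.drop pos).length
    · simp only [get_steps_recursive_alt_loop]
      rw [hchunk.1 hlt]
    · have hle : (L.drop pos).length ≤ k := by omega
      obtain ⟨cur', hc, hdc⟩ := hchunk.2 hle
      simp only [get_steps_recursive_alt_loop]
      rw [hc]
      dsimp only
      rw [← hL]
      have hq : 0 < q := by
        rcases Nat.eq_zero_or_pos q with h0 | h0
        · subst h0
          rw [hlen] at hle
          omega
        · exact h0
      have hpos0 : pos + (L.drop pos).length = L.length := by rw [hlen]; omega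
      rw [hpos0, Nat.mod_self] at hdc
      have hrec := ih 0 (s + (((L.drop pos).length : Nat) : Int)) cur' (k - (L.drop pos).length)
        hq hdc (by have := List.length_pos_iff.mpr hne; omega)
        (by
          rw [hlen] at hle ⊢
          have h1 : (q + 1 - 1) * L.length = L.length + (q - 1) * L.length := by
            cases q with
            | zero => omega
            | succ q' =>
              simp only [Nat.add_sub_cancel]
              ring
          rw [h1] at hk
          omega)
      have hdrop0 : L.drop 0 = L := by simp
      rw [hdrop0] at hrec
      rw [hrec]
      rw [hlen]
      have hlep : pos ≤ L.length := by omega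
      have hklen : (L.drop pos).length ≤ k := hle
      rw [hlen] at hklen
      push_cast [Nat.cast_sub hlep, Nat.cast_sub hklen]
      ring

-- both ports return steps immediately at "ZZZ"
lemma pv_goA_zzz (nodes : List (String × List String)) (instructions : String) (fuel : Nat)
    (steps instructions_count : Int) :
    get_steps_recursive_go nodes instructions fuel steps "ZZZ" instructions_count = steps := by
  cases fuel <;> simp [get_steps_recursive_go]

-- ===== VERDICT (by name: the statement is the Claim_ definition above) =====
theorem get_steps_recursive_spec : Claim_equal_get_steps_recursive := by
  intro steps nodes instructions current_node instructions_count _hDom hPre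
  unfold Spec_get_steps_recursive
  rcases hPre with hz | ⟨hne, hK, hdist⟩
  · subst hz
    unfold get_steps_recursive get_steps_recursive_alt
    rw [pv_goA_zzz]
    simp
  · have hz : current_node ≠ "ZZZ" ∨ current_node = "ZZZ" := (em _).symm
    set L := instructions.toList with hLdef
    have hlen : 0 < L.length := List.length_pos_iff.mpr hne
    have hLc : PySem.Str.len instructions = ((L.length : Nat) : Int) := by
      simp [PySem.Str.len, hLdef]
    have hL : 0 < PySem.Str.len instructions := by rw [hLc]; exact_mod_cast hlen
    obtain ⟨k, hk⟩ := Option.isSome_iff_exists.mp hdist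
    have hkle : k ≤ pvFuelA nodes instructions := pv_dist_le nodes L _ _ _ _ hk
    have hm0 : 0 ≤ PySem.Int.mod steps (PySem.Str.len instructions) :=
      PySem.Int.mod_nonneg steps hL
    have hm1 : PySem.Int.mod steps (PySem.Str.len instructions) < PySem.Str.len instructions :=
      PySem.Int.mod_lt steps hL
    -- A side
    have hA : get_steps_recursive steps nodes instructions current_node instructions_count
        = steps + k := by
      unfold get_steps_recursive
      rw [pv_go_eq nodes instructions (pvFuelA nodes instructions) steps instructions_count
            current_node hne hK]
      exact pv_ref_eq nodes instructions hne k (pvFuelA nodes instructions) steps current_node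
        hkle ⟨pvFuelA nodes instructions, hk⟩
    -- B side
    by_cases hzz : current_node = "ZZZ"
    · subst hzz
      have := pv_distE_zzz nodes L _ _ ⟨pvFuelA nodes instructions, hk⟩
      subst this
      rw [hA]
      unfold get_steps_recursive_alt
      simp
    · have hB : get_steps_recursive_alt steps nodes instructions current_node instructions_count
          = steps + k := by
        unfold get_steps_recursive_alt
        rw [if_neg hzz]
        dsimp only
        rw [if_neg (show ¬ PySem.Str.len instructions = 0 by omega)]
        have hslice : PySem.List.slice L (some (PySem.Int.mod steps (PySem.Str.len instructions))) none
            = L.drop (PySem.Int.mod steps (PySem.Str.len instructions)).toNat :=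
          PySem.List.slice_from L hm0
        rw [hslice]
        have hpos2 : (PySem.Int.mod steps (PySem.Str.len instructions)).toNat < L.length := by
          rw [hLc] at hm1 ⊢
          omega
        apply pv_loop_eq nodes instructions hne (pvFuelB nodes)
          ((PySem.Int.mod steps (PySem.Str.len instructions)).toNat) steps current_node k
          (by unfold pvFuelB; omega)
          ⟨pvFuelA nodes instructions, hk⟩
          hpos2
        -- fuel bound: k ≤ pvFuelA < (len - pos) + (pvFuelB - 1) * len
        have hF : pvFuelA nodes instructions = (2 * nodes.length + 2) * L.length + 2 := rfl
        rw [hF] at hkle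
        have hB' : pvFuelB nodes - 1 = 2 * nodes.length + 5 := by unfold pvFuelB; omega
        rw [hB']
        have hexp : (2 * nodes.length + 5) * L.length
            = (2 * nodes.length + 2) * L.length + 3 * L.length := by ring
        rw [hexp]
        omega
      rw [hA, hB]
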